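-- pv_equiv track=rewrite | github.com/dharmesh03/SkinCareAi | Downloads/dermascan_ai_rebuilt/skin_project_new/organize_kaggle.py | map_name
-- ===== SOURCE A (Python) =====
-- def map_name(name: str, name_map: dict) -> str | None:
--     """Map a folder/label name to standard disease name."""
--     lower = name.lower().strip()
--     # 1. Exact match
--     if lower in name_map:
--         return name_map[lower]
--     # 2. Partial match (key inside folder name)
--     for key, disease in name_map.items():
--         if key and key in lower:
--             return disease
--     # 3. Partial match (folder name inside key)
--     for key, disease in name_map.items():
--         if lower and lower in key:
--             return disease
--     return None
-- ===== SOURCE B (Python) =====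
-- def map_name(name: str, name_map: dict) -> str | None:
--     """Map a folder/label name to standard disease name."""
--     lower = name.lower().strip()
--     # one pass keeping the best (lowest) match rank seen so far:
--     # 0 exact, 1 key-in-name, 2 name-in-key; a test is skipped when it cannot improve the rank
--     best_rank, best = 3, None
--     for key, disease in name_map.items():
--         if key == lower:
--             best_rank, best = 0, disease
--             break  # exact match is unbeatable
--         if best_rank > 1 and key and key in lower:
--             best_rank, best = 1, disease
--         elif best_rank > 2 and lower and lower in key:
--             best_rank, best = 2, disease
--     return best
-- ===== Notes on version B (the rewrite author's own statement) =====
-- stated objective: alternative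
-- what changed: Instead of three staged scans with early return per phase, B scores every entry with a match-quality rank (0 exact, 1 key-in-name, 2 name-in-key, 3 none) and keeps the earliest strict-minimum in one pass, breaking only when the unbeatable rank 0 is found.
import Mathlib
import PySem

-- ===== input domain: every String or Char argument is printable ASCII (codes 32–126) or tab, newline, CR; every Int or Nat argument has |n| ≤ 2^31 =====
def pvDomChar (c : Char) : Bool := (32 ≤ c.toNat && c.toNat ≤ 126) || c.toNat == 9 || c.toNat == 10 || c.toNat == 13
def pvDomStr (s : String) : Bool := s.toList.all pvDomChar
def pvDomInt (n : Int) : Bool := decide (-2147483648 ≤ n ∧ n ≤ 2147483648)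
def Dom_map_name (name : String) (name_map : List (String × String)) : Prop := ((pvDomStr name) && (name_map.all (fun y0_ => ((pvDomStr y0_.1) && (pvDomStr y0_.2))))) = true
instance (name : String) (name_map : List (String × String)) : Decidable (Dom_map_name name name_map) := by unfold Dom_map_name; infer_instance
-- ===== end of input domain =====

-- B replaces A's three staged scans by scoring each entry with a match-quality rank and taking the earliest strict-minimum; same return value, no speed claim.

-- ===== PORT A =====
def map_name (name : String) (name_map : List (String × String)) : Option String :=
  let lower := PySem.Str.strip (PySem.Str.lower name)
  -- 1. exact match (dict membership/lookup = first match in the association list)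
  match name_map.find? (fun p => p.1 == lower) with
  | some p => some p.2
  | none =>
    -- 2. for key, disease: if key and key in lower: return disease
    match name_map.find? (fun p => !(p.1 == "") && PySem.Str.isIn p.1 lower) with
    | some p => some p.2
    | none =>
      -- 3. for key, disease: if lower and lower in key: return disease
      match name_map.find? (fun p => !(lower == "") && PySem.Str.isIn lower p.1) with
      | some p => some p.2
      | none => none

-- ===== PORT B =====
-- one pass keeping the best (lowest) match rank seen so far (0 exact, 1 key-in-name,
-- 2 name-in-key); a test is skipped when it cannot improve the rank; exact match breaks
def pvLoop (lower : String) : List (String × String) → Nat × Option String → Nat × Option String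
  | [], st => st
  | p :: t, st =>
    if p.1 == lower then (0, some p.2)
    else if decide (st.1 > 1) && (!(p.1 == "") && PySem.Str.isIn p.1 lower) then
      pvLoop lower t (1, some p.2)
    else if decide (st.1 > 2) && (!(lower == "") && PySem.Str.isIn lower p.1) then
      pvLoop lower t (2, some p.2)
    else pvLoop lower t st

def map_name_alt (name : String) (name_map : List (String × String)) : Option String :=
  let lower := PySem.Str.strip (PySem.Str.lower name)
  (pvLoop lower name_map (3, none)).2

-- ===== PRECONDITION & SPEC =====
def Spec_map_name (name : String) (name_map : List (String × String)) (out : Option String) : Prop := out = map_name_alt name name_map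
instance (name : String) (name_map : List (String × String)) (out : Option String) : Decidable (Spec_map_name name name_map out) := by unfold Spec_map_name; infer_instance

-- ===== CLAIM (what is proved, stated in full; the proofs are below) =====
def Claim_equal_map_name : Prop := ∀ (name : String) (name_map : List (String × String)), Dom_map_name name name_map → Spec_map_name name name_map (map_name name name_map)

-- ===== LEMMAS AND PROOFS =====

-- rank(key): 0 exact, 1 key-in-name, 2 name-in-key, 3 no match (proof-side scoring of one entry)
def pvRank (lower key : String) : Nat :=
  if key == lower then 0
  else if !(key == "") && PySem.Str.isIn key lower then 1
  else if !(lower == "") && PySem.Str.isIn lower key then 2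
  else 3

-- earliest minimum-rank entry of the list; (3, none) if no entry ranks below 3
def pvBest (lower : String) : List (String × String) → Nat × Option String
  | [] => (3, none)
  | p :: t =>
    let tb := pvBest lower t
    let r := pvRank lower p.1
    if r ≤ tb.1 ∧ r < 3 then (r, some p.2) else tb

theorem pvRank_le (lower key : String) : pvRank lower key ≤ 3 := by
  unfold pvRank; split_ifs <;> omega

theorem pvBest_cons (lower : String) (p : String × String) (t : List (String × String)) :
    pvBest lower (p :: t) =
      if pvRank lower p.1 ≤ (pvBest lower t).1 ∧ pvRank lower p.1 < 3
      then (pvRank lower p.1, some p.2) else pvBest lower t := rfl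

theorem foldl_zero (lower : String) :
    ∀ (l : List (String × String)) (b : Option String),
      l.foldl (fun (st : Nat × Option String) p =>
          let r := pvRank lower p.1
          if r < st.1 then (r, some p.2) else st) (0, b) = (0, b) := by
  intro l
  induction l with
  | nil => intro b; rfl
  | cons p t ih =>
    intro b
    rw [List.foldl_cons]
    show List.foldl (fun (st : Nat × Option String) p =>
        let r := pvRank lower p.1
        if r < st.1 then (r, some p.2) else st)
      (if pvRank lower p.1 < 0 then (pvRank lower p.1, some p.2) else ((0 : Nat), b)) t = (0, b)
    rw [if_neg (by omega)]
    exact ih b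

theorem pvLoop_eq_foldl (lower : String) :
    ∀ (l : List (String × String)) (st : Nat × Option String), 1 ≤ st.1 → st.1 ≤ 3 →
      pvLoop lower l st
      = l.foldl (fun (st : Nat × Option String) p =>
          let r := pvRank lower p.1
          if r < st.1 then (r, some p.2) else st) st := by
  intro l
  induction l with
  | nil => intro st _ _; rfl
  | cons p t ih =>
    intro st h1 h3
    rw [List.foldl_cons]
    show (if p.1 == lower then ((0 : Nat), some p.2)
          else if decide (st.1 > 1) && (!(p.1 == "") && PySem.Str.isIn p.1 lower) then
            pvLoop lower t (1, some p.2)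
          else if decide (st.1 > 2) && (!(lower == "") && PySem.Str.isIn lower p.1) then
            pvLoop lower t (2, some p.2)
          else pvLoop lower t st)
      = List.foldl (fun (st : Nat × Option String) p =>
          let r := pvRank lower p.1
          if r < st.1 then (r, some p.2) else st)
        (if pvRank lower p.1 < st.1 then (pvRank lower p.1, some p.2) else st) t
    cases hep : (p.1 == lower) with
    | true =>
      have hr : pvRank lower p.1 = 0 := by unfold pvRank; rw [if_pos hep]
      rw [if_pos rfl, hr, if_pos (by omega), foldl_zero]
    | false =>
      rw [if_neg (by simp)]
      cases hq1 : (!(p.1 == "") && PySem.Str.isIn p.1 lower) with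
      | true =>
        have hr : pvRank lower p.1 = 1 := by
          unfold pvRank; rw [if_neg (by rw [hep]; simp), if_pos hq1]
        rw [hr]
        by_cases hst : 1 < st.1
        · have hd : (decide (st.1 > 1) && true) = true := by simp [hst]
          rw [if_pos hd, if_pos hst, ih _ (by omega) (by omega)]
        · have hd : ¬ ((decide (st.1 > 1) && true) = true) := by simpa using hst
          have hd2 : ¬ ((decide (st.1 > 2) && (!(lower == "") && PySem.Str.isIn lower p.1)) = true) := by
            simp only [Bool.and_eq_true, decide_eq_true_eq, not_and]
            intro hc; exact absurd hc (by omega)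
          rw [if_neg hd, if_neg hd2, if_neg hst, ih _ h1 h3]
      | false =>
        rw [if_neg (by simp)]
        cases hq2 : (!(lower == "") && PySem.Str.isIn lower p.1) with
        | true =>
          have hr : pvRank lower p.1 = 2 := by
            unfold pvRank; rw [if_neg (by rw [hep]; simp), if_neg (by rw [hq1]; simp), if_pos hq2]
          rw [hr]
          by_cases hst : 2 < st.1
          · have hd2 : (decide (st.1 > 2) && true) = true := by simp [hst]
            rw [if_pos hd2, if_pos hst, ih _ (by omega) (by omega)]
          · have hd2 : ¬ ((decide (st.1 > 2) && true) = true) := by simpa using hst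
            rw [if_neg hd2, if_neg hst, ih _ h1 h3]
        | false =>
          have hr : pvRank lower p.1 = 3 := by
            unfold pvRank
            rw [if_neg (by rw [hep]; simp), if_neg (by rw [hq1]; simp), if_neg (by rw [hq2]; simp)]
          rw [if_neg (by simp), hr, if_neg (by omega), ih _ h1 h3]

theorem fold_best (lower : String) :
    ∀ (l : List (String × String)) (r : Nat) (b : Option String), r ≤ 3 →
      l.foldl (fun (st : Nat × Option String) p =>
          let r := pvRank lower p.1
          if r < st.1 then (r, some p.2) else st) (r, b)
      = if (pvBest lower l).1 < r then pvBest lower l else (r, b) := by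
  intro l
  induction l with
  | nil => intro r b hr; simp [pvBest]; omega
  | cons p t ih =>
    intro r b hr
    have hrk3 : pvRank lower p.1 ≤ 3 := pvRank_le lower p.1
    rw [List.foldl_cons]
    show List.foldl (fun (st : Nat × Option String) p =>
          let r := pvRank lower p.1
          if r < st.1 then (r, some p.2) else st)
        (if pvRank lower p.1 < r then (pvRank lower p.1, some p.2) else (r, b)) t
      = if (pvBest lower (p :: t)).1 < r then pvBest lower (p :: t) else (r, b)
    rw [pvBest_cons]
    by_cases h : pvRank lower p.1 < r
    · rw [if_pos h, ih _ _ (by omega)]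
      split_ifs <;> first | rfl | omega
    · rw [if_neg h, ih _ _ hr]
      split_ifs <;> first | rfl | omega

theorem best_exact (lower : String) :
    ∀ (l : List (String × String)) (q : String × String),
      l.find? (fun p => p.1 == lower) = some q → pvBest lower l = (0, some q.2) := by
  intro l
  induction l with
  | nil => intro q h; simp at h
  | cons p t ih =>
    intro q h
    rw [pvBest_cons]
    cases hep : (p.1 == lower) with
    | true =>
      rw [List.find?_cons_of_pos (by simpa using hep)] at h
      cases h
      have h0 : pvRank lower p.1 = 0 := by
        unfold pvRank; rw [if_pos hep]
      rw [if_pos (by rw [h0]; exact ⟨Nat.zero_le _, by omega⟩), h0]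
    | false =>
      rw [List.find?_cons_of_neg (by simp only [hep]; simp)] at h
      have ht := ih q h
      have h1 : 1 ≤ pvRank lower p.1 := by
        unfold pvRank; rw [if_neg (by simp only [hep]; simp)]
        split_ifs <;> omega
      rw [ht]
      split_ifs with hc
      · exfalso; simp at hc; omega
      · rfl

theorem best_no_exact (lower : String) :
    ∀ (l : List (String × String)),
      l.find? (fun p => p.1 == lower) = none → 1 ≤ (pvBest lower l).1 := by
  intro l
  induction l with
  | nil => intro _; simp [pvBest]
  | cons p t ih =>
    intro h
    cases hep : (p.1 == lower) with
    | true => rw [List.find?_cons_of_pos (by simpa using hep)] at h; cases h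
    | false =>
      rw [List.find?_cons_of_neg (by simp only [hep]; simp)] at h
      have ht := ih h
      have h1 : 1 ≤ pvRank lower p.1 := by
        unfold pvRank; rw [if_neg (by simp only [hep]; simp)]
        split_ifs <;> omega
      rw [pvBest_cons]
      split_ifs <;> omega

theorem best_phase2 (lower : String) :
    ∀ (l : List (String × String)) (q : String × String),
      l.find? (fun p => p.1 == lower) = none →
      l.find? (fun p => !(p.1 == "") && PySem.Str.isIn p.1 lower) = some q →
      pvBest lower l = (1, some q.2) := by
  intro l
  induction l with
  | nil => intro q _ h; simp at h
  | cons p t ih =>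
    intro q he h1
    cases hep : (p.1 == lower) with
    | true => rw [List.find?_cons_of_pos (by simpa using hep)] at he; cases he
    | false =>
      rw [List.find?_cons_of_neg (by simp only [hep]; simp)] at he
      rw [pvBest_cons]
      cases h1p : (!(p.1 == "") && PySem.Str.isIn p.1 lower) with
      | true =>
        rw [List.find?_cons_of_pos (by exact h1p)] at h1
        cases h1
        have htail := best_no_exact lower t he
        have hr1 : pvRank lower p.1 = 1 := by
          unfold pvRank; rw [if_neg (by simp only [hep]; simp), if_pos h1p]
        rw [hr1, if_pos ⟨htail, by omega⟩]
      | false =>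
        rw [List.find?_cons_of_neg (by rw [h1p]; simp)] at h1
        have ht := ih q he h1
        have hr2 : 2 ≤ pvRank lower p.1 := by
          unfold pvRank
          rw [if_neg (by simp only [hep]; simp), if_neg (by rw [h1p]; simp)]
          split_ifs <;> omega
        rw [ht]
        split_ifs with hc
        · exfalso; simp at hc; omega
        · rfl

theorem best_no_phase12 (lower : String) :
    ∀ (l : List (String × String)),
      l.find? (fun p => p.1 == lower) = none →
      l.find? (fun p => !(p.1 == "") && PySem.Str.isIn p.1 lower) = none →
      2 ≤ (pvBest lower l).1 := by
  intro l
  induction l with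
  | nil => intro _ _; simp [pvBest]
  | cons p t ih =>
    intro he h1
    cases hep : (p.1 == lower) with
    | true => rw [List.find?_cons_of_pos (by simpa using hep)] at he; cases he
    | false =>
      rw [List.find?_cons_of_neg (by simp only [hep]; simp)] at he
      cases h1p : (!(p.1 == "") && PySem.Str.isIn p.1 lower) with
      | true => rw [List.find?_cons_of_pos (by exact h1p)] at h1; cases h1
      | false =>
        rw [List.find?_cons_of_neg (by rw [h1p]; simp)] at h1
        have ht := ih he h1
        have hr2 : 2 ≤ pvRank lower p.1 := by
          unfold pvRank
          rw [if_neg (by simp only [hep]; simp), if_neg (by rw [h1p]; simp)]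
          split_ifs <;> omega
        rw [pvBest_cons]
        split_ifs <;> omega

theorem best_phase3 (lower : String) :
    ∀ (l : List (String × String)),
      l.find? (fun p => p.1 == lower) = none →
      l.find? (fun p => !(p.1 == "") && PySem.Str.isIn p.1 lower) = none →
      pvBest lower l =
        (match l.find? (fun p => !(lower == "") && PySem.Str.isIn lower p.1) with
         | some q => (2, some q.2)
         | none => (3, none)) := by
  intro l
  induction l with
  | nil => intro _ _; simp [pvBest]
  | cons p t ih =>
    intro he h1
    cases hep : (p.1 == lower) with
    | true => rw [List.find?_cons_of_pos (by simpa using hep)] at he; cases he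
    | false =>
      rw [List.find?_cons_of_neg (by simp only [hep]; simp)] at he
      cases h1p : (!(p.1 == "") && PySem.Str.isIn p.1 lower) with
      | true => rw [List.find?_cons_of_pos (by exact h1p)] at h1; cases h1
      | false =>
        rw [List.find?_cons_of_neg (by rw [h1p]; simp)] at h1
        rw [pvBest_cons]
        cases h2p : (!(lower == "") && PySem.Str.isIn lower p.1) with
        | true =>
          rw [List.find?_cons_of_pos (by exact h2p)]
          have htail := best_no_phase12 lower t he h1
          have hr : pvRank lower p.1 = 2 := by
            unfold pvRank
            rw [if_neg (by simp only [hep]; simp), if_neg (by rw [h1p]; simp), if_pos h2p]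
          rw [hr, if_pos ⟨htail, by omega⟩]
        | false =>
          rw [List.find?_cons_of_neg (by rw [h2p]; simp)]
          have ht := ih he h1
          have hr : pvRank lower p.1 = 3 := by
            unfold pvRank
            rw [if_neg (by simp only [hep]; simp), if_neg (by rw [h1p]; simp), if_neg (by rw [h2p]; simp)]
          rw [ht, hr]
          rw [if_neg (by intro hc; cases hf : t.find? (fun p => !(lower == "") && PySem.Str.isIn lower p.1) <;> rw [hf] at hc <;> simp at hc)]

-- ===== VERDICT (by name: the statement is the Claim_ definition above) =====
theorem map_name_spec : Claim_equal_map_name := by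
  intro name name_map _
  unfold Spec_map_name map_name map_name_alt
  simp only
  rw [pvLoop_eq_foldl _ name_map (3, none) (by omega) (by omega), fold_best _ name_map 3 none (le_refl 3)]
  set lower := PySem.Str.strip (PySem.Str.lower name) with hl
  cases he : name_map.find? (fun p => p.1 == lower) with
  | some q => rw [best_exact lower name_map q he]; rfl
  | none =>
    cases h1 : name_map.find? (fun p => !(p.1 == "") && PySem.Str.isIn p.1 lower) with
    | some q => rw [best_phase2 lower name_map q he h1]; rfl
    | none =>
      rw [best_phase3 lower name_map he h1]
      cases h2 : name_map.find? (fun p => !(lower == "") && PySem.Str.isIn lower p.1) <;> rfl
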